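-- pv_equiv track=rewrite | github.com/junsutaro/codetree-TILs | 240929/트로미노/tromino.py | rotate_and_reflect
-- ===== SOURCE A (Python) =====
-- def rotate_and_reflect(block):
--     variants = []
--     for _ in range(2):  # 원래와 대칭 모양
--         for _ in range(4):  # 4번 회전
--             variants.append(block)
--             block = [(y, -x) for x, y in block]  # 시계방향으로 90도 회전
--         block = [(x, -y) for x, y in block]  # x축 대칭
--     return variants
-- ===== SOURCE B (Python) =====
-- def rotate_and_reflect(block):
--     transforms = [
--         lambda x, y: (x, y),
--         lambda x, y: (y, -x),
--         lambda x, y: (-x, -y),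
--         lambda x, y: (-y, x),
--         lambda x, y: (x, -y),
--         lambda x, y: (-y, -x),
--         lambda x, y: (-x, y),
--         lambda x, y: (y, x),
--     ]
--     return [[t(x, y) for x, y in block] for t in transforms]
-- ===== Notes on version B (the rewrite author's own statement) =====
-- stated objective: simpler
-- what changed: Replaces the stateful loop that repeatedly rotates/reflects a running copy of the block with a fixed table of the 8 closed-form coordinate transforms mapped independently over the input.
import Mathlib
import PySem

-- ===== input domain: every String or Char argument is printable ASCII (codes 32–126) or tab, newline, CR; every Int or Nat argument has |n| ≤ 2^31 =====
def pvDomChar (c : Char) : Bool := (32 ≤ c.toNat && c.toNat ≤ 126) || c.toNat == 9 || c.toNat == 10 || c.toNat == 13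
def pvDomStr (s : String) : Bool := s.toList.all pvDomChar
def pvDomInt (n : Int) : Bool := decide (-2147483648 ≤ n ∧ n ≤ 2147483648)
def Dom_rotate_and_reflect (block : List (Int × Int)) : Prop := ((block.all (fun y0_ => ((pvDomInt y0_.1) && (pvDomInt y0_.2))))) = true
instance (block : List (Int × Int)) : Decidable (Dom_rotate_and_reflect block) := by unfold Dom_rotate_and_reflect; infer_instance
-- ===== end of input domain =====

-- B replaces A's running rotate/reflect state with a fixed table of 8 closed-form transforms (objective: simpler).

-- ===== PORT A =====
-- inner loop 'for _ in range(4)': append current block, then rotate it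
def rotate_and_reflect_inner (st : List (List (Int × Int)) × List (Int × Int)) :
    List (List (Int × Int)) × List (Int × Int) :=
  (PySem.List.pyRange 0 4 1).foldl
    (fun (st : List (List (Int × Int)) × List (Int × Int)) _ =>
      (st.1 ++ [st.2], st.2.map (fun p => (p.2, -p.1)))) st

def rotate_and_reflect (block : List (Int × Int)) : List (List (Int × Int)) :=
  ((PySem.List.pyRange 0 2 1).foldl
    (fun (st : List (List (Int × Int)) × List (Int × Int)) _ =>
      let st' := rotate_and_reflect_inner st
      (st'.1, st'.2.map (fun p => (p.1, -p.2)))) ([], block)).1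

-- ===== PORT B =====
def rotate_and_reflect_transforms : List (Int → Int → Int × Int) :=
  [ fun x y => (x, y),
    fun x y => (y, -x),
    fun x y => (-x, -y),
    fun x y => (-y, x),
    fun x y => (x, -y),
    fun x y => (-y, -x),
    fun x y => (-x, y),
    fun x y => (y, x) ]

def rotate_and_reflect_alt (block : List (Int × Int)) : List (List (Int × Int)) :=
  rotate_and_reflect_transforms.map (fun t => block.map (fun p => t p.1 p.2))

-- ===== PRECONDITION & SPEC =====
def Spec_rotate_and_reflect (block : List (Int × Int)) (out : List (List (Int × Int))) : Prop := out = rotate_and_reflect_alt block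
instance (block : List (Int × Int)) (out : List (List (Int × Int))) : Decidable (Spec_rotate_and_reflect block out) := by unfold Spec_rotate_and_reflect; infer_instance

-- ===== CLAIM (what is proved, stated in full; the proofs are below) =====
def Claim_equal_rotate_and_reflect : Prop := ∀ (block : List (Int × Int)), Dom_rotate_and_reflect block → Spec_rotate_and_reflect block (rotate_and_reflect block)

-- ===== LEMMAS AND PROOFS =====

-- ===== VERDICT (by name: the statement is the Claim_ definition above) =====
theorem rotate_and_reflect_spec : Claim_equal_rotate_and_reflect := by
  intro block _
  unfold Spec_rotate_and_reflect rotate_and_reflect rotate_and_reflect_inner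
    rotate_and_reflect_alt rotate_and_reflect_transforms
  simp [PySem.List.pyRange, List.range_succ]
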